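-- pv_equiv track=rewrite | github.com/cyrex562/monitor | net/ipv4.py | compare_ip_addr
-- ===== SOURCE A (Python) =====
-- def compare_ip_addr(ip_a, ip_b):
--     map_a = []
--     for i in range(4):
--         if ip_a[i] == ip_b[i]:
--             map_a.append(0)
--         elif ip_a[i] < ip_b[i]:
--             map_a.append(-1)
--         else:
--             map_a.append(1)
--     if map_a == [0, 0, 0, 0]:
--         return 0
--     elif map_a[0] == -1 or \
--                     map_a[:2] == [0, -1] or \
--                     map_a[:3] == [0, 0, -1] or \
--                     map_a == [0, 0, 0, -1]:
--         return -1
--     elif map_a[0] == 1 or \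
--                     map_a[:2] == [0, 1] or \
--                     map_a[:3] == [0, 0, 1] or \
--                     map_a == [0, 0, 0, 1]:
--         return 1
--     raise ValueError("invalid comparison result: map: {}".format(map_a))
-- ===== SOURCE B (Python) =====
-- def compare_ip_addr(ip_a, ip_b):
--     a = [ip_a[i] for i in range(4)]
--     b = [ip_b[i] for i in range(4)]
--     return (a > b) - (a < b)
-- ===== Notes on version B (the rewrite author's own statement) =====
-- stated objective: simpler
-- what changed: Replaces A's per-index sign vector and prefix-branch cascade (with an unreachable ValueError) by reading the first four octets of each address and delegating to Python's built-in lexicographic list comparison, returning its sign.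
import Mathlib
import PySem

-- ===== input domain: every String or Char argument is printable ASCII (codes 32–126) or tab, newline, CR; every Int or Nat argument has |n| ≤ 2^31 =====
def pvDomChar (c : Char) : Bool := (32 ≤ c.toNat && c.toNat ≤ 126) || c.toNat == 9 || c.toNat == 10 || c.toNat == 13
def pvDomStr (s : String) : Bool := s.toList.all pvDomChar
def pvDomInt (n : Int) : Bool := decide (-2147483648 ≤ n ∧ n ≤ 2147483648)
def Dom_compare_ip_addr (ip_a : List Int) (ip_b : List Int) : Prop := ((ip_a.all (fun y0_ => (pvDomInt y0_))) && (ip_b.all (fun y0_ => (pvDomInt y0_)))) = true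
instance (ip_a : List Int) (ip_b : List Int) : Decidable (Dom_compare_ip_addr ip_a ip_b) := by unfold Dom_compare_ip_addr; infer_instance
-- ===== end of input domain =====

-- B replaces A's per-index sign vector and branch cascade by a direct lexicographic
-- comparison of the first four octets (simpler decomposition; same cost).


-- ===== PORT A =====
-- transliteration of A: build map_a in a loop over range(4), then the prefix-branch cascade.
def compare_ip_addr (ip_a : List Int) (ip_b : List Int) : Int :=
  let map_a := (PySem.List.pyRange 0 4 1).foldl (fun acc i =>
    match PySem.List.pyGet? ip_a i, PySem.List.pyGet? ip_b i with
    | some x, some y =>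
        if x = y then acc ++ [(0 : Int)]
        else if x < y then acc ++ [(-1 : Int)]
        else acc ++ [(1 : Int)]
    | _, _ => acc  -- IndexError in Python; excluded by Pre_compare_ip_addr
    ) []
  if map_a = [0, 0, 0, 0] then 0
  else if (PySem.List.pyGet? map_a 0).getD 0 = -1 ∨
          PySem.List.slice map_a none (some 2) = [0, -1] ∨
          PySem.List.slice map_a none (some 3) = [0, 0, -1] ∨
          map_a = [0, 0, 0, -1] then -1
  else if (PySem.List.pyGet? map_a 0).getD 0 = 1 ∨
          PySem.List.slice map_a none (some 2) = [0, 1] ∨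
          PySem.List.slice map_a none (some 3) = [0, 0, 1] ∨
          map_a = [0, 0, 0, 1] then 1
  else 0  -- Python raises ValueError here; unreachable under Pre_compare_ip_addr

-- ===== PORT B =====
-- Python's lexicographic comparison of two equal-length int lists, as (a > b) - (a < b).
def lexCmp : List Int → List Int → Int
  | [], [] => 0
  | [], _ :: _ => -1
  | _ :: _, [] => 1
  | x :: xs, y :: ys => if x < y then -1 else if y < x then 1 else lexCmp xs ys

def compare_ip_addr_alt (ip_a : List Int) (ip_b : List Int) : Int :=
  let a := (PySem.List.pyRange 0 4 1).map (fun i => (PySem.List.pyGet? ip_a i).getD 0)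
  let b := (PySem.List.pyRange 0 4 1).map (fun i => (PySem.List.pyGet? ip_b i).getD 0)
  lexCmp a b

-- ===== PRECONDITION & SPEC =====
-- Pre_ excludes exactly the inputs on which A raises IndexError: a list shorter than 4.
def Pre_compare_ip_addr (ip_a : List Int) (ip_b : List Int) : Prop :=
  4 ≤ ip_a.length ∧ 4 ≤ ip_b.length
instance (ip_a : List Int) (ip_b : List Int) : Decidable (Pre_compare_ip_addr ip_a ip_b) := by
  unfold Pre_compare_ip_addr; infer_instance
def pvWitness_compare_ip_addr : List Int × List Int := ([10, 0, 0, 1], [10, 0, 0, 2])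

def Spec_compare_ip_addr (ip_a : List Int) (ip_b : List Int) (out : Int) : Prop := out = compare_ip_addr_alt ip_a ip_b
instance (ip_a : List Int) (ip_b : List Int) (out : Int) : Decidable (Spec_compare_ip_addr ip_a ip_b out) := by unfold Spec_compare_ip_addr; infer_instance

-- ===== CLAIM (what is proved, stated in full; the proofs are below) =====
def Claim_equal_compare_ip_addr : Prop := ∀ (ip_a : List Int) (ip_b : List Int), Dom_compare_ip_addr ip_a ip_b → Pre_compare_ip_addr ip_a ip_b → Spec_compare_ip_addr ip_a ip_b (compare_ip_addr ip_a ip_b)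

-- ===== LEMMAS AND PROOFS =====

-- ===== VERDICT (by name: the statement is the Claim_ definition above) =====
theorem pyRange04 : PySem.List.pyRange 0 4 1 = [0, 1, 2, 3] := by decide

theorem pyget4 (x0 x1 x2 x3 : Int) (t : List Int) :
    PySem.List.pyGet? (x0 :: x1 :: x2 :: x3 :: t) 0 = some x0 ∧
    PySem.List.pyGet? (x0 :: x1 :: x2 :: x3 :: t) 1 = some x1 ∧
    PySem.List.pyGet? (x0 :: x1 :: x2 :: x3 :: t) 2 = some x2 ∧
    PySem.List.pyGet? (x0 :: x1 :: x2 :: x3 :: t) 3 = some x3 := by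
  refine ⟨?_, ?_, ?_, ?_⟩ <;>
    (simp [PySem.List.pyGet?, PySem.List.pyIdx?]; rw [if_pos (by omega)]; simp)

set_option maxHeartbeats 4000000 in
theorem mapA (a0 a1 a2 a3 b0 b1 b2 b3 : Int) (ta tb : List Int) :
    (([0, 1, 2, 3] : List Int).foldl (fun acc i =>
      match PySem.List.pyGet? (a0 :: a1 :: a2 :: a3 :: ta) i,
            PySem.List.pyGet? (b0 :: b1 :: b2 :: b3 :: tb) i with
      | some x, some y =>
          if x = y then acc ++ [(0 : Int)]
          else if x < y then acc ++ [(-1 : Int)]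
          else acc ++ [(1 : Int)]
      | _, _ => acc) []) =
    [if a0 = b0 then (0 : Int) else if a0 < b0 then -1 else 1,
     if a1 = b1 then (0 : Int) else if a1 < b1 then -1 else 1,
     if a2 = b2 then (0 : Int) else if a2 < b2 then -1 else 1,
     if a3 = b3 then (0 : Int) else if a3 < b3 then -1 else 1] := by
  simp only [List.foldl, (pyget4 a0 a1 a2 a3 ta).1, (pyget4 a0 a1 a2 a3 ta).2.1,
    (pyget4 a0 a1 a2 a3 ta).2.2.1, (pyget4 a0 a1 a2 a3 ta).2.2.2,
    (pyget4 b0 b1 b2 b3 tb).1, (pyget4 b0 b1 b2 b3 tb).2.1,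
    (pyget4 b0 b1 b2 b3 tb).2.2.1, (pyget4 b0 b1 b2 b3 tb).2.2.2]
  split_ifs <;> simp

theorem slice2 (c0 c1 c2 c3 : Int) :
    PySem.List.slice [c0, c1, c2, c3] none (some 2) = [c0, c1] := by
  have h := PySem.List.slice_to_natCast (xs := [c0, c1, c2, c3]) (b := 2)
  norm_num at h; exact h

theorem slice3 (c0 c1 c2 c3 : Int) :
    PySem.List.slice [c0, c1, c2, c3] none (some 3) = [c0, c1, c2] := by
  have h := PySem.List.slice_to_natCast (xs := [c0, c1, c2, c3]) (b := 3)
  norm_num at h; exact h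

-- the heart of the proof: A's sign-vector cascade equals lexicographic comparison
set_option maxHeartbeats 4000000 in
theorem cascade_eq (a0 a1 a2 a3 b0 b1 b2 b3 : Int)
    (c0 c1 c2 c3 : Int)
    (h0 : c0 = if a0 = b0 then 0 else if a0 < b0 then -1 else 1)
    (h1 : c1 = if a1 = b1 then 0 else if a1 < b1 then -1 else 1)
    (h2 : c2 = if a2 = b2 then 0 else if a2 < b2 then -1 else 1)
    (h3 : c3 = if a3 = b3 then 0 else if a3 < b3 then -1 else 1) :
    (if ([c0, c1, c2, c3] : List Int) = [0, 0, 0, 0] then (0 : Int)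
     else if c0 = -1 ∨ ([c0, c1] : List Int) = [0, -1] ∨
             ([c0, c1, c2] : List Int) = [0, 0, -1] ∨
             ([c0, c1, c2, c3] : List Int) = [0, 0, 0, -1] then -1
     else if c0 = 1 ∨ ([c0, c1] : List Int) = [0, 1] ∨
             ([c0, c1, c2] : List Int) = [0, 0, 1] ∨
             ([c0, c1, c2, c3] : List Int) = [0, 0, 0, 1] then 1
     else 0) = lexCmp [a0, a1, a2, a3] [b0, b1, b2, b3] := by
  subst h0 h1 h2 h3
  simp only [lexCmp, List.cons.injEq, and_true]
  rcases lt_trichotomy a0 b0 with h0 | h0 | h0 <;>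
  rcases lt_trichotomy a1 b1 with h1 | h1 | h1 <;>
  rcases lt_trichotomy a2 b2 with h2 | h2 | h2 <;>
  rcases lt_trichotomy a3 b3 with h3 | h3 | h3 <;>
    simp_all [Int.ne_of_lt, Int.ne_of_gt, Int.not_lt.mpr, le_of_lt]

-- ===== VERDICT (by name: the statement is the Claim_ definition above) =====
set_option maxHeartbeats 4000000 in
theorem compare_ip_addr_spec : Claim_equal_compare_ip_addr := by
  intro ip_a ip_b _ hpre
  obtain ⟨ha, hb⟩ := hpre
  match ip_a, ip_b with
  | a0 :: a1 :: a2 :: a3 :: ta, b0 :: b1 :: b2 :: b3 :: tb =>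
    unfold Spec_compare_ip_addr compare_ip_addr compare_ip_addr_alt
    rw [pyRange04]
    simp only [mapA, List.map, (pyget4 a0 a1 a2 a3 ta).1, (pyget4 a0 a1 a2 a3 ta).2.1,
      (pyget4 a0 a1 a2 a3 ta).2.2.1, (pyget4 a0 a1 a2 a3 ta).2.2.2,
      (pyget4 b0 b1 b2 b3 tb).1, (pyget4 b0 b1 b2 b3 tb).2.1,
      (pyget4 b0 b1 b2 b3 tb).2.2.1, (pyget4 b0 b1 b2 b3 tb).2.2.2,
      Option.getD_some, slice2, slice3, PySem.List.pyGet?_zero_cons]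
    exact cascade_eq a0 a1 a2 a3 b0 b1 b2 b3 _ _ _ _ rfl rfl rfl rfl
  | [], _ => simp at ha
  | [_], _ => simp at ha
  | [_, _], _ => simp at ha
  | [_, _, _], _ => simp at ha
  | _ :: _ :: _ :: _ :: _, [] => simp at hb
  | _ :: _ :: _ :: _ :: _, [_] => simp at hb
  | _ :: _ :: _ :: _ :: _, [_, _] => simp at hb
  | _ :: _ :: _ :: _ :: _, [_, _, _] => simp at hb
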